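-- pv_equiv track=rewrite | github.com/iCaird/spyro-3 | tools/fix_jtbl_align.py | fix_section
-- ===== SOURCE A (Python) =====
-- def fix_section(lines):
--     lines = iter(lines)
--     for line in lines:
--         if line.strip().startswith('.section .rodata'): # Hold the line, if the next line is .align 3
--             next_line = next(lines, "")
--             if next_line.strip().replace("\t", " ").startswith('.align 3'):
--                 yield '.section .rodata.jtbl\n'
--                 yield next_line
--             else:
--                 yield line
--                 yield next_line
--         else:
--             yield line
-- ===== SOURCE B (Python) =====
-- def fix_section(lines):
--     lines = list(lines)
--     # pass 1: mark the "header" lines (a rodata section line not already consumed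
--     # as the lookahead of a previous header)
--     headers = []
--     prev = False
--     for line in lines:
--         cur = (not prev) and line.strip().startswith('.section .rodata')
--         headers.append(cur)
--         prev = cur
--     # pass 2: zip each line with its successor and its flag; rewrite flagged lines
--     # whose successor is an '.align 3' directive
--     nexts = lines[1:] + ['']
--     return ['.section .rodata.jtbl\n'
--             if h and nxt.strip().replace('\t', ' ').startswith('.align 3')
--             else line
--             for line, nxt, h in zip(lines, nexts, headers)]
-- ===== Notes on version B (the rewrite author's own statement) =====
-- stated objective: alternative
-- what changed: Replaces A's single-pass generator that advances a shared iterator with an inner next() by two staged passes: a flag scan marking unconsumed rodata headers, then a zip of each line with its successor and its flag; B also drops the phantom trailing empty string A yields when the file ends in an unpaired rodata header.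
-- intended difference: On inputs whose trailing maximal run of '.section .rodata' lines has odd length, A yields an extra trailing '' (the next(lines,'') default, a phantom line not in the input); B omits it, which is the intended output of a line-rewriting filter. — e.g. on fix_section([".section .rodata"]): A returns [".section .rodata", ""], B returns [".section .rodata"]
import Mathlib
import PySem

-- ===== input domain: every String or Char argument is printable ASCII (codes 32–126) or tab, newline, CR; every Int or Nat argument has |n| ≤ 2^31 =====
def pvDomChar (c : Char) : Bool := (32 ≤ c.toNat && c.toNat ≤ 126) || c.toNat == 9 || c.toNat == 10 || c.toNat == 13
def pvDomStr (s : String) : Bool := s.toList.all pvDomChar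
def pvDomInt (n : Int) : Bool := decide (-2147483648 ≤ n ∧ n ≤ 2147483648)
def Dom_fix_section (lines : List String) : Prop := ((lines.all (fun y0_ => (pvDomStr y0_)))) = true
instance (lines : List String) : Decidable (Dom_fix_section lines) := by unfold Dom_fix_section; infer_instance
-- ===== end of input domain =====

-- B replaces A's generator (shared iterator advanced by an inner next()) with two staged
-- passes: a flag scan marking the unconsumed rodata headers, then a zip of each line with
-- its successor and flag (objective: alternative decomposition, same cost). A is a
-- generator; the equivalence is about the sequence of yielded lines (B returns that list).


-- shared helper conditions (identical textual tests in both Python sources)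
-- line.strip().startswith('.section .rodata')
def pvIsRodata (s : String) : Bool := PySem.Str.startswith (PySem.Str.strip s) ".section .rodata"
-- s.strip().replace("\t", " ").startswith('.align 3')
def pvIsAlign (s : String) : Bool :=
  PySem.Str.startswith (PySem.Str.replace (PySem.Str.strip s) "\t" " ") ".align 3"

-- ===== PORT A =====
-- generator: for line in lines, on a rodata header consume next(lines, "") inside the loop
def fix_section : List String → List String
  | [] => []
  | line :: rest =>
    if pvIsRodata line then
      match rest with
      | [] =>  -- next(lines, "") defaults to ""
        if pvIsAlign "" then [".section .rodata.jtbl\n", ""] else [line, ""]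
      | next_line :: rest' =>
        if pvIsAlign next_line then
          ".section .rodata.jtbl\n" :: next_line :: fix_section rest'
        else
          line :: next_line :: fix_section rest'
    else line :: fix_section rest

-- ===== PORT B =====
-- pass 1 of Source B: the flag-scan loop building `headers` while carrying `prev`
def pvMkHeaders : List String → Bool → List Bool
  | [], _ => []
  | l :: rest, prev =>
    let cur := !prev && pvIsRodata l
    cur :: pvMkHeaders rest cur

-- pass 2 of Source B: nexts = lines[1:] + [''], then the zip comprehension
def fix_section_alt (lines : List String) : List String :=
  let headers := pvMkHeaders lines false
  let nexts := lines.drop 1 ++ [""]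
  (lines.zip (nexts.zip headers)).map (fun p =>
    if p.2.2 && pvIsAlign p.2.1 then ".section .rodata.jtbl\n" else p.1)

-- ===== PRECONDITION & SPEC =====
-- length of the trailing run of rodata-header lines (a shape condition on the input)
def pvTailRun (lines : List String) : Nat := (lines.reverse.takeWhile pvIsRodata).length

-- When the trailing maximal run of '.section .rodata' lines is odd, its last line is an
-- unconsumed header at end of input, where A yields a phantom trailing "" (the next(lines,"")
-- default) that is not a line of the input; B drops it, which is the intended output.
def D_fix_section (lines : List String) : Prop := pvTailRun lines % 2 = 1
instance (lines : List String) : Decidable (D_fix_section lines) := by unfold D_fix_section; infer_instance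

def Spec_fix_section (lines : List String) (out : List String) : Prop :=
  ¬ D_fix_section lines → out = fix_section_alt lines
instance (lines : List String) (out : List String) : Decidable (Spec_fix_section lines out) := by unfold Spec_fix_section; infer_instance

def pvDiffWitness_fix_section : List String := [".section .rodata"]
def pvDiffWitnessOut_fix_section : (List String) × (List String) :=
  ([".section .rodata", ""], [".section .rodata"])

-- ===== CLAIM (what is proved, stated in full; the proofs are below) =====
def Claim_unchanged_fix_section : Prop := ∀ (lines : List String), Dom_fix_section lines → Spec_fix_section lines (fix_section lines)
def Claim_changed_fix_section : Prop := Dom_fix_section (pvDiffWitness_fix_section) ∧ D_fix_section (pvDiffWitness_fix_section) ∧ fix_section (pvDiffWitness_fix_section) = pvDiffWitnessOut_fix_section.1 ∧ fix_section_alt (pvDiffWitness_fix_section) = pvDiffWitnessOut_fix_section.2 ∧ pvDiffWitnessOut_fix_section.1 ≠ pvDiffWitnessOut_fix_section.2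
def Claim_exact_fix_section : Prop := ∀ (lines : List String), Dom_fix_section lines → D_fix_section lines → fix_section lines ≠ fix_section_alt lines

-- ===== LEMMAS AND PROOFS =====

-- proof-only view of B's zip/map core, parameterised by the scan's carried flag
def pvCore (lines : List String) (prev : Bool) : List String :=
  (lines.zip ((lines.drop 1 ++ [""]).zip (pvMkHeaders lines prev))).map (fun p =>
    if p.2.2 && pvIsAlign p.2.1 then ".section .rodata.jtbl\n" else p.1)

theorem pvAlt_eq_core (lines : List String) : fix_section_alt lines = pvCore lines false := rfl

theorem pvCore_nil (prev : Bool) : pvCore [] prev = [] := rfl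

theorem pvCore_cons (l : String) (rest : List String) (prev : Bool) :
    pvCore (l :: rest) prev =
      (if (!prev && pvIsRodata l) && pvIsAlign (rest.headD "") then ".section .rodata.jtbl\n" else l)
        :: pvCore rest (!prev && pvIsRodata l) := by
  cases rest with
  | nil => simp [pvCore, pvMkHeaders]
  | cons y ys => simp [pvCore, pvMkHeaders]

-- A-side unfolding equations
theorem pvFixA_not (x : String) (rest : List String) (h : ¬ pvIsRodata x = true) :
    fix_section (x :: rest) = x :: fix_section rest := by
  rw [fix_section.eq_def]; simp [h]

theorem pvFixA_rodata_nil (x : String) (h : pvIsRodata x = true) :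
    fix_section [x] = [x, ""] := by
  rw [fix_section.eq_def]; simp [h, show pvIsAlign "" = false from rfl]

theorem pvFixA_rodata_cons (x y : String) (rest : List String) (h : pvIsRodata x = true) :
    fix_section (x :: y :: rest) =
      (if pvIsAlign y then ".section .rodata.jtbl\n" else x) :: y :: fix_section rest := by
  rw [fix_section.eq_def]; simp [h]; split <;> simp

-- trailing-run recurrence
theorem pvTailRun_cons (l : String) (rest : List String) :
    pvTailRun (l :: rest) =
      if pvTailRun rest = rest.length then rest.length + (if pvIsRodata l then 1 else 0)
      else pvTailRun rest := by
  unfold pvTailRun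
  rw [List.reverse_cons, List.takeWhile_append]
  simp only [List.length_reverse]
  by_cases hc : (rest.reverse.takeWhile pvIsRodata).length = rest.length
  · rw [if_pos hc, if_pos hc]
    have hall : rest.reverse.takeWhile pvIsRodata = rest.reverse :=
      (List.takeWhile_prefix _).eq_of_length (by simpa using hc)
    by_cases hl : pvIsRodata l <;> simp [List.takeWhile, hl]
  · rw [if_neg hc, if_neg hc]

theorem pvTailRun_le (rest : List String) : pvTailRun rest ≤ rest.length := by
  unfold pvTailRun
  simpa using (List.takeWhile_prefix (p := pvIsRodata) (l := rest.reverse)).length_le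

-- parity is preserved by a non-rodata head, and by two steps after a rodata head
theorem pvParity_not (l : String) (rest : List String) (h : ¬ pvIsRodata l = true) :
    pvTailRun (l :: rest) = pvTailRun rest := by
  rw [pvTailRun_cons]; simp [h]
  intro he; omega

theorem pvParity_two (l y : String) (rest : List String) (h : pvIsRodata l = true) :
    pvTailRun (l :: y :: rest) % 2 = pvTailRun rest % 2 := by
  rw [pvTailRun_cons, pvTailRun_cons]
  have hle := pvTailRun_le rest
  by_cases hr0 : pvTailRun rest = rest.length
  · by_cases hy : pvIsRodata y
    · simp [hr0, hy, h]; omega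
    · simp [hr0, hy]
  · have h2 : ¬ pvTailRun rest = rest.length + 1 := by omega
    simp [hr0, h2]

-- main invariant: A's yield sequence is B's list, plus the phantom "" iff the trailing run is odd
theorem pvMain (n : Nat) : ∀ lines : List String, lines.length ≤ n →
    fix_section lines = pvCore lines false ++ (if pvTailRun lines % 2 = 1 then [""] else []) := by
  induction n with
  | zero =>
    intro lines h
    have : lines = [] := List.eq_nil_of_length_eq_zero (by omega)
    subst this; simp [pvTailRun]; rfl
  | succ n ih =>
    intro lines h
    match lines with
    | [] => simp [pvTailRun]; rfl
    | l :: rest =>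
      by_cases hr : pvIsRodata l
      · match rest with
        | [] =>
          rw [pvFixA_rodata_nil l hr, pvCore_cons]
          simp [pvTailRun, List.takeWhile, hr, pvCore_nil,
            show pvIsAlign "" = false from rfl]
        | y :: rest' =>
          rw [pvFixA_rodata_cons l y rest' hr, pvCore_cons, pvCore_cons]
          have hy2 : (!(!false && pvIsRodata l) && pvIsRodata y) = false := by simp [hr]
          rw [ih rest' (by simp at h; omega)]
          have hpar := pvParity_two l y rest' hr
          simp only [hr, Bool.not_false, Bool.true_and, Bool.and_self]
          simp [List.headD, hpar]
      · rw [pvFixA_not l rest hr, pvCore_cons, ih rest (by simp at h; omega),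
          pvParity_not l rest hr]
        simp [hr]

-- ===== VERDICT (by name: the statement is the Claim_ definition above) =====
theorem fix_section_spec : Claim_unchanged_fix_section := by
  intro lines _
  unfold Spec_fix_section D_fix_section
  intro hnd
  rw [pvAlt_eq_core, pvMain lines.length lines le_rfl, if_neg hnd]
  simp

theorem fix_section_changed : Claim_changed_fix_section := by
  unfold Claim_changed_fix_section; decide

theorem fix_section_tight : Claim_exact_fix_section := by
  intro lines _ hd heq
  unfold D_fix_section at hd
  have hm := pvMain lines.length lines le_rfl
  rw [pvAlt_eq_core] at heq
  rw [heq, if_pos hd] at hm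
  simp at hm
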